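-- pv_equiv track=rewrite | github.com/Ashiq-am/Path-of-Python | 3.Data Types/Arrays Set 1 and Set 2/Prefix Sum/Count maximum non-overlapping subarrays with given sum/Count maximum non-overlapping subarrays with given sum.py | maximumSubarrays
-- ===== SOURCE A (Python) =====
-- def maximumSubarrays(arr, N, target):
--     # Stores the final count
--     ans = 0
--
--     # Next subarray should start
--     # from index >= availIdx
--     availIdx = -1
--
--     # Tracks the prefix sum
--     cur_sum = 0
--
--     # Map to store the prefix sum
--     # for respective indices
--     mp = {}
--     mp[0] = -1
--
--     for i in range(N):
--         cur_sum += arr[i]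
--
--         # Check if cur_sum - target is
--         # present in the array or not
--         if ((cur_sum - target) in mp and
--                 mp[cur_sum - target] >= availIdx):
--             ans += 1
--             availIdx = i
--
--         # Update the index of
--         # current prefix sum
--         mp[cur_sum] = i
--
--     # Return the count of subarrays
--     return ans
-- ===== SOURCE B (Python) =====
-- def maximumSubarrays(arr, N, target):
--     # Bottom-up DP over prefixes: dp[i] = max number of disjoint target-sum
--     # subarrays inside arr[:i]; dp[i] = max(dp[i-1], dp[j] + 1) where j is the
--     # latest prefix length with prefix_sum[j] == prefix_sum[i] - target.
--     prefix = 0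
--     best_end = {0: 0}          # prefix sum -> latest prefix length having it
--     dp = [0]
--     for i in range(1, N + 1):
--         prefix += arr[i - 1]
--         take = dp[-1]
--         j = best_end.get(prefix - target)
--         if j is not None and dp[j] + 1 > take:
--             take = dp[j] + 1
--         dp.append(take)
--         best_end[prefix] = i
--     return dp[-1]
-- ===== Notes on version B (the rewrite author's own statement) =====
-- stated objective: alternative
-- what changed: Replaces A's one-pass greedy (prefix-sum dict plus an availIdx cut pointer) with a bottom-up dynamic program over prefixes: dp[i] = max(dp[i-1], dp[j]+1) for the latest prefix length j with prefix_sum[j] = prefix_sum[i] - target; returns dp[N].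
import Mathlib
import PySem

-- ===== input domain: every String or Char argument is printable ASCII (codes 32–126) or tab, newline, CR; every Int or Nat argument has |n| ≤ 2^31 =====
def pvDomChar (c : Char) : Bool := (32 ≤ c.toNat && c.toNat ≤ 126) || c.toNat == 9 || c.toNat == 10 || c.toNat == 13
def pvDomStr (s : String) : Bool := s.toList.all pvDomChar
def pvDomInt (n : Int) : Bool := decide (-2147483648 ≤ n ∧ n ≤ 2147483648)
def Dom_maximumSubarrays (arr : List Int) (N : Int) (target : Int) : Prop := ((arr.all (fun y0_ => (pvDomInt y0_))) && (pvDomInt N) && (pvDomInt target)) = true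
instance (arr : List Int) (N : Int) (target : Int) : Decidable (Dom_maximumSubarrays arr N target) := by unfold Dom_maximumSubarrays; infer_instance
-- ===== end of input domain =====

-- B replaces A's greedy scan (prefix-sum→index dict plus availIdx cut pointer) with a
-- bottom-up dynamic program over prefixes (dp[i] = max(dp[i-1], dp[j]+1)); same count.


-- ===== PORT A =====
-- state: (ans, availIdx, cur_sum, mp)
def pvStepA (arr : List Int) (target : Int)
    (st : Int × Int × Int × PySem.Dict Int Int) (i : Int) :
    Int × Int × Int × PySem.Dict Int Int :=
  let cur := st.2.2.1 + PySem.List.pyGetD arr i 0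
  match st.2.2.2.get? (cur - target) with
  | some v =>
      if v ≥ st.2.1 then (st.1 + 1, i, cur, st.2.2.2.insert cur i)
      else (st.1, st.2.1, cur, st.2.2.2.insert cur i)
  | none => (st.1, st.2.1, cur, st.2.2.2.insert cur i)

def maximumSubarrays (arr : List Int) (N : Int) (target : Int) : Int :=
  ((PySem.List.pyRange 0 N 1).foldl (pvStepA arr target)
      (0, -1, 0, PySem.Dict.empty.insert 0 (-1))).1

-- ===== PORT B =====
-- state: (prefix, best_end, dp)
def pvStepB (arr : List Int) (target : Int)
    (st : Int × PySem.Dict Int Int × List Int) (i : Int) :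
    Int × PySem.Dict Int Int × List Int :=
  let pfx := st.1 + PySem.List.pyGetD arr (i - 1) 0
  let take := PySem.List.pyGetD st.2.2 (-1) 0
  let take :=
    match st.2.1.get? (pfx - target) with
    | some j =>
        if PySem.List.pyGetD st.2.2 j 0 + 1 > take then PySem.List.pyGetD st.2.2 j 0 + 1
        else take
    | none => take
  (pfx, st.2.1.insert pfx i, st.2.2 ++ [take])

def maximumSubarrays_alt (arr : List Int) (N : Int) (target : Int) : Int :=
  PySem.List.pyGetD
    (((PySem.List.pyRange 1 (N + 1) 1).foldl (pvStepB arr target)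
        (0, PySem.Dict.empty.insert 0 0, [0])).2.2) (-1) 0

-- ===== PRECONDITION & SPEC =====
-- A indexes arr[i] for i in range(N): it raises IndexError iff N > len(arr).
def Pre_maximumSubarrays (arr : List Int) (N : Int) (target : Int) : Prop :=
  N ≤ (arr.length : Int)
instance (arr : List Int) (N : Int) (target : Int) : Decidable (Pre_maximumSubarrays arr N target) := by unfold Pre_maximumSubarrays; infer_instance

def pvWitness_maximumSubarrays : List Int × Int × Int := ([1, 2, 1], 3, 3)

def Spec_maximumSubarrays (arr : List Int) (N : Int) (target : Int) (out : Int) : Prop := out = maximumSubarrays_alt arr N target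
instance (arr : List Int) (N : Int) (target : Int) (out : Int) : Decidable (Spec_maximumSubarrays arr N target out) := by unfold Spec_maximumSubarrays; infer_instance

-- ===== CLAIM (what is proved, stated in full; the proofs are below) =====
def Claim_equal_maximumSubarrays : Prop := ∀ (arr : List Int) (N : Int) (target : Int), Dom_maximumSubarrays arr N target → Pre_maximumSubarrays arr N target → Spec_maximumSubarrays arr N target (maximumSubarrays arr N target)

-- ===== LEMMAS AND PROOFS =====

-- dp[-1] is dp[len-1]
theorem pvGetD_last (dp : List Int) (h : dp ≠ []) :
    PySem.List.pyGetD dp (-1) 0 = PySem.List.pyGetD dp ((dp.length : Int) - 1) 0 := by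
  have hl : 0 < dp.length := List.length_pos_iff.mpr h
  rw [PySem.List.pyGetD_neg_one dp 0 h,
      PySem.List.pyGetD_eq_getElem dp 0 (by omega) (by omega),
      List.getLast_eq_getElem]
  congr 1
  omega

-- appending does not change existing entries
theorem pvGetD_append (dp : List Int) (x j : Int) (h0 : 0 ≤ j) (h1 : j < (dp.length : Int)) :
    PySem.List.pyGetD (dp ++ [x]) j 0 = PySem.List.pyGetD dp j 0 := by
  rw [PySem.List.pyGetD_eq_getElem (dp ++ [x]) 0 h0 (by simp; omega),
      PySem.List.pyGetD_eq_getElem dp 0 h0 h1]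
  exact List.getElem_append_left (by omega)

-- the appended entry
theorem pvGetD_append_self (dp : List Int) (x : Int) :
    PySem.List.pyGetD (dp ++ [x]) ((dp.length : Int)) 0 = x := by
  rw [PySem.List.pyGetD_eq_getElem (dp ++ [x]) 0 (by omega) (by simp)]
  simp

-- Invariant tying A's state (ans, avail, cur, mp) after a steps to B's state
-- (prefix, best_end, dp) after the corresponding a steps.
def pvInv (a : Int) (sA : Int × Int × Int × PySem.Dict Int Int)
    (sB : Int × PySem.Dict Int Int × List Int) : Prop :=
  0 ≤ a ∧
  sA.2.2.1 = sB.1 ∧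
  (sB.2.2.length : Int) = a + 1 ∧
  sA.2.1 < a ∧
  -1 ≤ sA.2.1 ∧
  (∀ s v, sA.2.2.2.get? s = some v → -1 ≤ v ∧ v < a) ∧
  (∀ s, sB.2.1.get? s = (sA.2.2.2.get? s).map (· + 1)) ∧
  (∀ j : Int, 0 ≤ j → j ≤ a → PySem.List.pyGetD sB.2.2 j 0 ≤ sA.1) ∧
  (∀ j : Int, sA.2.1 + 1 ≤ j → j ≤ a → PySem.List.pyGetD sB.2.2 j 0 = sA.1) ∧
  (∀ j : Int, 0 ≤ j → j ≤ sA.2.1 → PySem.List.pyGetD sB.2.2 j 0 < sA.1)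

theorem pvStep_inv (arr : List Int) (target a : Int)
    (sA : Int × Int × Int × PySem.Dict Int Int) (sB : Int × PySem.Dict Int Int × List Int)
    (h : pvInv a sA sB) :
    pvInv (a + 1) (pvStepA arr target sA a) (pvStepB arr target sB (a + 1)) := by
  obtain ⟨ansA, availA, curA, mp⟩ := sA
  obtain ⟨pfx, last, dp⟩ := sB
  obtain ⟨h0, h1, h2, h3, h3b, h4, h5, h6, h7, h8⟩ := h
  simp only at h1 h2 h3 h3b h4 h5 h6 h7 h8
  subst h1
  have hne : dp ≠ [] := by intro hd; subst hd; simp at h2; omega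
  have htake : PySem.List.pyGetD dp (-1) 0 = ansA := by
    rw [pvGetD_last dp hne, h2, show a + 1 - 1 = a by omega]
    exact h7 a (by omega) (le_refl a)
  set cur := curA + PySem.List.pyGetD arr a 0 with hcur
  have hidx : a + 1 - 1 = a := by omega
  unfold pvStepA pvStepB
  simp only [hidx, ← hcur, h5 (cur - target), htake]
  rcases hg : mp.get? (cur - target) with _ | v
  · -- key absent in mp: B's lookup is none too
    simp only [Option.map_none]
    simp only [pvInv]
    refine ⟨by omega, trivial, by simp; omega, by omega, by omega, ?_, ?_, ?_, ?_, ?_⟩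
    · intro s v hv
      rw [PySem.Dict.get?_insert] at hv
      split_ifs at hv with hs
      · injection hv with hv; omega
      · have := h4 s v hv; omega
    · intro s
      rw [PySem.Dict.get?_insert, PySem.Dict.get?_insert]
      split_ifs with hs
      · rfl
      · exact h5 s
    · intro j hj0 hj1
      by_cases hja : j ≤ a
      · rw [pvGetD_append dp ansA j hj0 (by omega)]; exact h6 j hj0 hja
      · have : j = a + 1 := by omega
        subst this
        rw [← h2, pvGetD_append_self]
    · intro j hj0 hj1
      by_cases hja : j ≤ a
      · rw [pvGetD_append dp ansA j (by omega) (by omega)]; exact h7 j hj0 hja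
      · have : j = a + 1 := by omega
        subst this
        rw [← h2, pvGetD_append_self]
    · intro j hj0 hj1
      rw [pvGetD_append dp ansA j hj0 (by omega)]
      exact h8 j hj0 hj1
  · obtain ⟨hv1, hv2⟩ := h4 (cur - target) v hg
    simp only [Option.map_some]
    by_cases hge : v ≥ availA
    · -- fresh index: A counts; B's dp[v+1] = ansA so dp[v+1]+1 > ansA and B takes
      have hdj : PySem.List.pyGetD dp (v + 1) 0 = ansA :=
        h7 (v + 1) (by omega) (by omega)
      rw [if_pos hge, hdj, if_pos (by omega)]
      simp only [pvInv]
      refine ⟨by omega, trivial, by simp; omega, by omega, by omega, ?_, ?_, ?_, ?_, ?_⟩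
      · intro s w hw
        rw [PySem.Dict.get?_insert] at hw
        split_ifs at hw with hs
        · injection hw with hw; omega
        · have := h4 s w hw; omega
      · intro s
        rw [PySem.Dict.get?_insert, PySem.Dict.get?_insert]
        split_ifs with hs
        · rfl
        · exact h5 s
      · intro j hj0 hj1
        by_cases hja : j ≤ a
        · rw [pvGetD_append dp (ansA + 1) j hj0 (by omega)]
          have := h6 j hj0 hja; omega
        · have : j = a + 1 := by omega
          subst this
          rw [← h2, pvGetD_append_self]
      · intro j hj0 hj1
        have : j = a + 1 := by omega
        subst this
        rw [← h2, pvGetD_append_self]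
      · intro j hj0 hj1
        rw [pvGetD_append dp (ansA + 1) j hj0 (by omega)]
        have := h6 j hj0 (by omega); omega
    · -- stale index: A skips; B's dp[v+1] < ansA so the candidate does not improve
      have hdj : PySem.List.pyGetD dp (v + 1) 0 < ansA :=
        h8 (v + 1) (by omega) (by omega)
      rw [if_neg hge, if_neg (by omega)]
      simp only [pvInv]
      refine ⟨by omega, trivial, by simp; omega, by omega, by omega, ?_, ?_, ?_, ?_, ?_⟩
      · intro s w hw
        rw [PySem.Dict.get?_insert] at hw
        split_ifs at hw with hs
        · injection hw with hw; omega
        · have := h4 s w hw; omega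
      · intro s
        rw [PySem.Dict.get?_insert, PySem.Dict.get?_insert]
        split_ifs with hs
        · rfl
        · exact h5 s
      · intro j hj0 hj1
        by_cases hja : j ≤ a
        · rw [pvGetD_append dp ansA j hj0 (by omega)]; exact h6 j hj0 hja
        · have : j = a + 1 := by omega
          subst this
          rw [← h2, pvGetD_append_self]
      · intro j hj0 hj1
        by_cases hja : j ≤ a
        · rw [pvGetD_append dp ansA j (by omega) (by omega)]; exact h7 j hj0 hja
        · have : j = a + 1 := by omega
          subst this
          rw [← h2, pvGetD_append_self]
      · intro j hj0 hj1
        rw [pvGetD_append dp ansA j hj0 (by omega)]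
        exact h8 j hj0 hj1

theorem pvFold_eq (arr : List Int) (target : Int) :
    ∀ (n : Nat) (a b : Int), (b - a).toNat = n →
    ∀ sA sB, pvInv a sA sB →
    ((PySem.List.pyRange a b 1).foldl (pvStepA arr target) sA).1 =
    PySem.List.pyGetD
      (((PySem.List.pyRange (a + 1) (b + 1) 1).foldl (pvStepB arr target) sB).2.2) (-1) 0 := by
  intro n
  induction n with
  | zero =>
      intro a b hab sA sB hinv
      obtain ⟨h0, _, h2, h3, _, _, _, _, h7, _⟩ := hinv
      rw [PySem.List.pyRange_one_eq_nil (by omega), PySem.List.pyRange_one_eq_nil (by omega)]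
      simp only [List.foldl_nil]
      have hne : sB.2.2 ≠ [] := by
        intro hd
        rw [hd] at h2; simp at h2; omega
      rw [pvGetD_last sB.2.2 hne, h2, show a + 1 - 1 = a by omega]
      exact (h7 a (by omega) (le_refl a)).symm
  | succ m ih =>
      intro a b hab sA sB hinv
      have hlt : a < b := by omega
      rw [PySem.List.pyRange_one_cons (show a < b by omega),
          PySem.List.pyRange_one_cons (show a + 1 < b + 1 by omega)]
      simp only [List.foldl_cons]
      exact ih (a + 1) (b) (by omega) _ _ (pvStep_inv arr target a sA sB hinv)

-- ===== VERDICT (by name: the statement is the Claim_ definition above) =====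
theorem maximumSubarrays_spec : Claim_equal_maximumSubarrays := by
  intro arr N target _ _
  unfold Spec_maximumSubarrays maximumSubarrays maximumSubarrays_alt
  refine pvFold_eq arr target (N - 0).toNat 0 N rfl _ _ ?_
  simp only [pvInv]
  refine ⟨le_refl 0, trivial, by simp, by norm_num, by norm_num, ?_, ?_, ?_, ?_, ?_⟩
  · intro s v hv
    rw [PySem.Dict.get?_insert] at hv
    split_ifs at hv with hs
    · injection hv with hv; omega
    · rw [PySem.Dict.get?_empty] at hv; exact absurd hv (by simp)
  · intro s
    rw [PySem.Dict.get?_insert, PySem.Dict.get?_insert]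
    split_ifs with hs
    · rfl
    · simp
  · intro j hj0 hj1
    have : j = 0 := by omega
    subst this
    simp [PySem.List.pyGetD_zero_cons]
  · intro j hj0 hj1
    have : j = 0 := by omega
    subst this
    simp [PySem.List.pyGetD_zero_cons]
  · intro j hj0 hj1
    omega
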